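-- pv_equiv track=rewrite | github.com/RodrigoMendoza2000/Lab-2-A-Search-Algorithm | fifteen_puzzle.py | successors
-- ===== SOURCE A (Python) =====
-- Frame = tuple[tuple[int, ...], ...]
--
-- def successors(frame: Frame) -> list[Frame]:
--     """Returns a list with all the possible frame configurations
--     that are one move away from the input frame.
--
--     Args:
--         frame (Frame): a tuple of tuples that represents the frame
--
--     Returns:
--         list[Frame]: a list of all valid successors to the entered frame
--     """
--
--     flat: tuple[int, ...] = tuple(i for tup in frame for i in tup)
--     rows: int = len(frame)
--     columns: int = len(frame[0])
--     zero_index: int = flat.index(0)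
--
--     def swap(i1: int, i2: int) -> Frame:
--         """Swap the values at the given indices."""
--         lst: list[int] = list(flat)
--         lst[i1], lst[i2] = lst[i2], lst[i1]
--         return tuple(tuple(lst[r * columns:(r + 1) * columns])
--                      for r in range(rows))
--
--     # Generate potential successors
--     up = swap(zero_index, zero_index - columns) \
--         if zero_index >= columns \
--         else None
--     down = swap(zero_index, zero_index + columns) \
--         if zero_index + columns < len(flat) \
--         else None
--     left = swap(zero_index, zero_index - 1) \
--         if zero_index % columns != 0 \
--         else None
--     right = swap(zero_index, zero_index + 1) \
--         if (zero_index + 1) % columns != 0 \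
--         else None
--
--     return [s for s in (up, down, left, right) if s is not None]
-- ===== SOURCE B (Python) =====
-- def successors(frame):
--     rows, cols = len(frame), len(frame[0])
--     r, c = next((i, j)
--                 for i, row in enumerate(frame)
--                 for j, v in enumerate(row)
--                 if v == 0)
--     result = []
--     for dr, dc in ((-1, 0), (1, 0), (0, -1), (0, 1)):
--         nr, nc = r + dr, c + dc
--         if 0 <= nr < rows and 0 <= nc < cols:
--             grid = [list(row) for row in frame]
--             grid[r][c], grid[nr][nc] = grid[nr][nc], grid[r][c]
--             result.append(tuple(tuple(row) for row in grid))
--     return result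
-- ===== Notes on version B (the rewrite author's own statement) =====
-- stated objective: idiomatic
-- what changed: B keeps the board in 2-D: it finds the blank's (row, col) with a row-major generator scan and, for each of the four (dr, dc) deltas in up/down/left/right order, bounds-checks and swaps the two cells in a row-wise copy, instead of A's flatten / flat-index-arithmetic / re-slice pipeline; Pre_ excludes the empty frame and frames without a 0 (A raises there) and ragged frames, on which A's flat-index reshaping yields accidental boards outside the puzzle's natural domain while B's 2-D indexing raises.
-- outside the precondition, e.g. on successors(((1, 0), (2,))): A returns [((0, 1), (2,))], B raises IndexError
import Mathlib
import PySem

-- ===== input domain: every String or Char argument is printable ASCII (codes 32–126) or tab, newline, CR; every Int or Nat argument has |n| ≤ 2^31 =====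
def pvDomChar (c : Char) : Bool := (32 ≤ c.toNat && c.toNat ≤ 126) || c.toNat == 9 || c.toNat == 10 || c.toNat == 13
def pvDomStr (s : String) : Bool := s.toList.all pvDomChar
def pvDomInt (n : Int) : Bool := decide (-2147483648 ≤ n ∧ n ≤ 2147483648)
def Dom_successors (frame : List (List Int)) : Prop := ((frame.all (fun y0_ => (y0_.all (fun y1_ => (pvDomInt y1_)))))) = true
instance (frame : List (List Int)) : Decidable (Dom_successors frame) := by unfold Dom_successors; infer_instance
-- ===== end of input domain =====

-- B keeps the board in 2-D (row-major scan for the blank, bounds-checked (dr,dc) deltas,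
-- cell swap on a row-wise copy) instead of A's flatten / index-arithmetic / re-slice
-- pipeline; objective: idiomatic, same asymptotic cost.
-- ===== PORT A =====
-- the inner helper `swap` of A
def pvSwapA (flat : List Int) (rows columns : Int) (i1 i2 : Int) : List (List Int) :=
  let v1 := PySem.List.pyGetD flat i1 0
  let v2 := PySem.List.pyGetD flat i2 0
  let lst := PySem.List.pySetD (PySem.List.pySetD flat i1 v2) i2 v1
  (PySem.List.pyRange 0 rows 1).map (fun r =>
    PySem.List.slice lst (some (r * columns)) (some ((r + 1) * columns)))

def successors (frame : List (List Int)) : List (List (List Int)) :=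
  let flat := frame.flatten
  let rows : Int := (frame.length : Int)
  match frame with
  | [] => []  -- frame[0] raises IndexError on the empty frame (outside Pre_)
  | row0 :: _ =>
    let columns : Int := (row0.length : Int)
    match PySem.List.index? flat 0 with
    | none => []  -- flat.index(0) raises ValueError when there is no blank (outside Pre_)
    | some zn =>
      let z : Int := (zn : Int)
      let up := if z ≥ columns then some (pvSwapA flat rows columns z (z - columns)) else none
      let down := if z + columns < (flat.length : Int) then some (pvSwapA flat rows columns z (z + columns)) else none
      let left := if PySem.Int.mod z columns ≠ 0 then some (pvSwapA flat rows columns z (z - 1)) else none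
      let right := if PySem.Int.mod (z + 1) columns ≠ 0 then some (pvSwapA flat rows columns z (z + 1)) else none
      ([up, down, left, right]).filterMap id

-- ===== PORT B =====
-- the `if v == 0` part of B's generator, over one row
def pvFindRow : List Int → Option Nat
  | [] => none
  | v :: rest => if v == 0 then some 0 else (pvFindRow rest).map (· + 1)

-- B's row-major generator scan for the blank's (r, c): first 0 in row-major order
def pvFind0 : List (List Int) → Option (Nat × Nat)
  | [] => none
  | row :: rest =>
    match pvFindRow row with
    | some j => some (0, j)
    | none => (pvFind0 rest).map (fun rc => (rc.1 + 1, rc.2))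

-- `grid[r][c], grid[nr][nc] = grid[nr][nc], grid[r][c]` on the row-wise copy
def pvSwapB (frame : List (List Int)) (r c nr nc : Nat) : List (List Int) :=
  let a := (frame.getD r []).getD c 0
  let b := (frame.getD nr []).getD nc 0
  let g1 := frame.set r ((frame.getD r []).set c b)
  g1.set nr ((g1.getD nr []).set nc a)

def successors_alt (frame : List (List Int)) : List (List (List Int)) :=
  let rows : Int := (frame.length : Int)
  let cols : Int := ((frame.headD []).length : Int)  -- len(frame[0]); raises outside Pre_
  match pvFind0 frame with
  | none => []  -- the exhausted generator raises StopIteration (outside Pre_)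
  | some (r, c) =>
    [((-1 : Int), (0 : Int)), (1, 0), (0, -1), (0, 1)].foldl
      (fun acc d =>
        let nr : Int := (r : Int) + d.1
        let nc : Int := (c : Int) + d.2
        if 0 ≤ nr ∧ nr < rows ∧ 0 ≤ nc ∧ nc < cols then
          acc ++ [pvSwapB frame r c nr.toNat nc.toNat]
        else acc) []

-- ===== PRECONDITION & SPEC =====
-- Pre_ excludes the empty frame (A raises IndexError), frames without a 0 (A raises
-- ValueError, B raises StopIteration) and ragged frames, on which A's flat-index
-- arithmetic yields accidental reshaped boards outside the puzzle's natural domain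
-- and B's 2-D indexing can raise.
def Pre_successors (frame : List (List Int)) : Prop :=
  frame ≠ [] ∧ (∀ row ∈ frame, row.length = (frame.headD []).length) ∧ (0 : Int) ∈ frame.flatten
instance (frame : List (List Int)) : Decidable (Pre_successors frame) := by
  unfold Pre_successors; infer_instance
def pvWitness_successors : List (List Int) := [[1, 0], [2, 3]]
def Spec_successors (frame : List (List Int)) (out : List (List (List Int))) : Prop := out = successors_alt frame
instance (frame : List (List Int)) (out : List (List (List Int))) : Decidable (Spec_successors frame out) := by unfold Spec_successors; infer_instance

-- ===== CLAIM (what is proved, stated in full; the proofs are below) =====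
def Claim_equal_successors : Prop := ∀ (frame : List (List Int)), Dom_successors frame → Pre_successors frame → Spec_successors frame (successors frame)

-- ===== LEMMAS AND PROOFS =====

theorem pvFindRow_eq (row : List Int) : pvFindRow row = PySem.List.index? row 0 := by
  induction row with
  | nil => simp [pvFindRow, PySem.List.index?]
  | cons v rest ih =>
    by_cases h : v = 0
    · subst h; rw [PySem.List.index?_cons_self]; simp [pvFindRow]
    · rw [PySem.List.index?_cons_of_ne _ h]
      simp [pvFindRow, h, ih]

theorem pv_index?_append_of_not_mem (l t : List Int) (v : Int)
    (h : v ∉ l) : PySem.List.index? (l ++ t) v = (PySem.List.index? t v).map (· + l.length) := by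
  induction l with
  | nil => simp
  | cons x xs ih =>
    have hx : x ≠ v := by intro e; exact h (e ▸ List.mem_cons_self)
    have hxs : v ∉ xs := fun hm => h (List.mem_cons_of_mem _ hm)
    rw [List.cons_append, PySem.List.index?_cons_of_ne _ hx, ih hxs]
    cases PySem.List.index? t v <;> simp <;> omega

theorem pv_flatten_len (f : List (List Int)) (n : Nat) (h : ∀ row ∈ f, row.length = n) :
    f.flatten.length = f.length * n := by
  induction f with
  | nil => simp
  | cons row rest ih =>
    simp only [List.flatten_cons, List.length_append, List.length_cons]
    rw [h row List.mem_cons_self, ih (fun r hr => h r (List.mem_cons_of_mem _ hr))]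
    ring

theorem pv_find_spec (f : List (List Int)) (n : Nat) (h : ∀ row ∈ f, row.length = n)
    (hm : (0 : Int) ∈ f.flatten) :
    ∃ r c, pvFind0 f = some (r, c) ∧ r < f.length ∧ c < n ∧
      PySem.List.index? f.flatten 0 = some (r * n + c) := by
  induction f with
  | nil => simp at hm
  | cons row rest ih =>
    by_cases hrow : (0 : Int) ∈ row
    · have hidx : (PySem.List.index? row 0).isSome := (PySem.List.index?_isSome_iff _ _).mpr hrow
      obtain ⟨c, hc⟩ := Option.isSome_iff_exists.mp hidx
      obtain ⟨hlt, -, -⟩ := PySem.List.getElem_of_index?_eq_some hc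
      refine ⟨0, c, ?_, by simp, ?_, ?_⟩
      · simp only [pvFind0, pvFindRow_eq, hc]
      · exact (h row List.mem_cons_self) ▸ hlt
      · rw [List.flatten_cons, PySem.List.index?_append_of_mem _ hrow, hc]
        simp
    · have hrest : (0 : Int) ∈ rest.flatten := by
        simp only [List.flatten_cons, List.mem_append] at hm
        tauto
      obtain ⟨r, c, h1, h2, h3, h4⟩ := ih (fun r hr => h r (List.mem_cons_of_mem _ hr)) hrest
      have hnone : pvFindRow row = none := by
        rw [pvFindRow_eq]
        exact (PySem.List.index?_eq_none_iff _ _).mpr hrow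
      refine ⟨r + 1, c, ?_, by simpa using h2, h3, ?_⟩
      · simp only [pvFind0, hnone, h1, Option.map_some]
      · rw [List.flatten_cons, pv_index?_append_of_not_mem _ _ _ hrow, h4,
          h row List.mem_cons_self]
        simp; ring


theorem pv_flatten_getD (f : List (List Int)) (n : Nat) (h : ∀ row ∈ f, row.length = n) :
    ∀ r c, r < f.length → c < n →
      f.flatten.getD (r * n + c) 0 = (f.getD r []).getD c 0 := by
  induction f with
  | nil => intro r c hr _; simp at hr
  | cons row rest ih =>
    intro r c hr hc
    cases r with
    | zero =>
      have hl : c < row.length := by rw [h row List.mem_cons_self]; exact hc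
      simpa [List.flatten_cons, List.getD, List.getElem?_append_left hl] using rfl
    | succ r =>
      have harith : (r + 1) * n + c = row.length + (r * n + c) := by
        rw [h row List.mem_cons_self]; ring
      rw [List.flatten_cons, harith, List.getD_cons_succ]
      rw [show (row ++ rest.flatten).getD (row.length + (r * n + c)) 0
            = rest.flatten.getD (r * n + c) 0 from by
        simp [List.getD, List.getElem?_append_right (Nat.le_add_right _ _)]]
      exact ih (fun x hx => h x (List.mem_cons_of_mem _ hx)) r c (by simpa using hr) hc

theorem pv_flatten_set (f : List (List Int)) (n : Nat) (h : ∀ row ∈ f, row.length = n)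
    (v : Int) : ∀ r c, r < f.length → c < n →
      f.flatten.set (r * n + c) v = (f.set r ((f.getD r []).set c v)).flatten := by
  induction f with
  | nil => intro r c hr _; simp at hr
  | cons row rest ih =>
    intro r c hr hc
    cases r with
    | zero =>
      have hl : c < row.length := by rw [h row List.mem_cons_self]; exact hc
      simp [List.flatten_cons, List.set_append_left c v hl]
    | succ r =>
      have harith : (r + 1) * n + c = row.length + (r * n + c) := by
        rw [h row List.mem_cons_self]; ring
      rw [List.flatten_cons, harith, List.set_append, if_neg (by omega)]
      simp only [Nat.add_sub_cancel_left, List.set_cons_succ, List.getD_cons_succ,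
        List.flatten_cons, List.append_cancel_left_eq]
      exact ih (fun x hx => h x (List.mem_cons_of_mem _ hx)) r c (by simpa using hr) hc

theorem pv_rect_set (f : List (List Int)) (n : Nat) (h : ∀ row ∈ f, row.length = n)
    (r : Nat) (x : List Int) (hx : x.length = n) :
    ∀ row ∈ f.set r x, row.length = n := by
  intro row hrow
  rcases List.mem_or_eq_of_mem_set hrow with hm | rfl
  · exact h row hm
  · exact hx

theorem pv_unflatten_nat (f : List (List Int)) (n : Nat) (h : ∀ row ∈ f, row.length = n) :
    (List.range f.length).map (fun k => (f.flatten.drop (k * n)).take n) = f := by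
  induction f with
  | nil => simp
  | cons row rest ih =>
    rw [List.length_cons, List.range_succ_eq_map, List.map_cons, List.map_map]
    congr 1
    · simpa [List.flatten_cons] using
        List.take_left' (l₂ := rest.flatten) (h row List.mem_cons_self)
    · rw [show ((fun k => ((row :: rest).flatten.drop (k * n)).take n) ∘ (fun i => i + 1))
            = fun k => (rest.flatten.drop (k * n)).take n from ?_]
      · exact ih (fun x hx => h x (List.mem_cons_of_mem _ hx))
      · funext k
        simp only [Function.comp_apply, List.flatten_cons]
        rw [show (k + 1) * n = row.length + k * n from by rw [h row List.mem_cons_self]; ring,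
          List.drop_length_add_append]

theorem pv_unflatten (f : List (List Int)) (n : Nat) (h : ∀ row ∈ f, row.length = n) :
    (PySem.List.pyRange 0 (f.length : Int) 1).map (fun r =>
        PySem.List.slice f.flatten (some (r * (n : Int))) (some ((r + 1) * (n : Int)))) = f := by
  rw [PySem.List.pyRange_one, List.map_map]
  have hlen : ((f.length : Int) - 0).toNat = f.length := by omega
  rw [hlen]
  calc (List.range f.length).map ((fun r => PySem.List.slice f.flatten (some (r * (n : Int)))
          (some ((r + 1) * (n : Int)))) ∘ fun k => (0 : Int) + ↑k)
      = (List.range f.length).map (fun k => (f.flatten.drop (k * n)).take n) := by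
        apply List.map_congr_left
        intro k _
        simp only [Function.comp_apply, Int.zero_add]
        rw [show ((k : Int)) * (n : Int) = ((k * n : Nat) : Int) from by push_cast; ring,
          show ((k : Int) + 1) * (n : Int) = (((k + 1) * n : Nat) : Int) from by push_cast; ring,
          PySem.List.slice_natCast]
        congr 1
        have : (k + 1) * n = k * n + n := by ring
        omega
    _ = f := pv_unflatten_nat f n h


theorem pv_getD_mem (f : List (List Int)) (r : Nat) (h : r < f.length) : f.getD r [] ∈ f := by
  rw [List.getD_eq_getElem f [] h]; exact List.getElem_mem h

theorem pv_swap_eq (f : List (List Int)) (n : Nat) (h : ∀ row ∈ f, row.length = n)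
    (r c r' c' : Nat) (hr : r < f.length) (hc : c < n) (hr' : r' < f.length) (hc' : c' < n) :
    pvSwapA f.flatten (f.length : Int) (n : Int) ((r * n + c : Nat) : Int) ((r' * n + c' : Nat) : Int)
      = pvSwapB f r c r' c' := by
  unfold pvSwapA pvSwapB
  simp only [PySem.List.pyGetD_natCast, PySem.List.pySetD_natCast]
  rw [pv_flatten_getD f n h r c hr hc, pv_flatten_getD f n h r' c' hr' hc']
  rw [pv_flatten_set f n h _ r c hr hc]
  have hg1rect : ∀ row ∈ f.set r ((f.getD r []).set c ((f.getD r' []).getD c' 0)),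
      row.length = n := by
    apply pv_rect_set f n h
    rw [List.length_set]
    exact h _ (pv_getD_mem f r hr)
  have hg1len : (f.set r ((f.getD r []).set c ((f.getD r' []).getD c' 0))).length = f.length := by
    simp
  rw [pv_flatten_set _ n hg1rect _ r' c' (by rw [hg1len]; exact hr') hc']
  have h2rect : ∀ row ∈ (f.set r ((f.getD r []).set c ((f.getD r' []).getD c' 0))).set r'
      (((f.set r ((f.getD r []).set c ((f.getD r' []).getD c' 0))).getD r' []).set c'
        ((f.getD r []).getD c 0)), row.length = n := by
    apply pv_rect_set _ n hg1rect
    rw [List.length_set]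
    apply hg1rect
    exact pv_getD_mem _ r' (by rw [hg1len]; exact hr')
  have h2len : ((f.set r ((f.getD r []).set c ((f.getD r' []).getD c' 0))).set r'
      (((f.set r ((f.getD r []).set c ((f.getD r' []).getD c' 0))).getD r' []).set c'
        ((f.getD r []).getD c 0))).length = f.length := by simp
  rw [show ((f.length : Int)) = (((f.set r ((f.getD r []).set c ((f.getD r' []).getD c' 0))).set r'
      (((f.set r ((f.getD r []).set c ((f.getD r' []).getD c' 0))).getD r' []).set c'
        ((f.getD r []).getD c 0))).length : Int) from by rw [h2len]]
  exact pv_unflatten _ n h2rect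

theorem pv_bd_up (r c q : Nat) (hc : c < q) : q ≤ r * q + c ↔ 1 ≤ r := by
  cases r with
  | zero => simp; omega
  | succ r =>
    have h1 : (r + 1) * q = r * q + q := by ring
    constructor
    · intro _; omega
    · intro _; omega

theorem pv_bd_down (r c q rows : Nat) (hc : c < q) : r * q + c + q < rows * q ↔ r + 1 < rows := by
  constructor
  · intro hlt
    by_contra hge
    push_neg at hge
    have h1 : rows * q ≤ (r + 1) * q := Nat.mul_le_mul_right q hge
    have h2 : (r + 1) * q = r * q + q := by ring
    omega
  · intro hlt
    have h1 : (r + 2) * q ≤ rows * q := Nat.mul_le_mul_right q hlt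
    have h2 : (r + 2) * q = r * q + q + q := by ring
    omega

theorem pv_mod_lin (a c q : Nat) (hc : c < q) :
    PySem.Int.mod ((a : Int) * q + c) q = c := by
  rw [PySem.Int.mod_eq_emod_of_pos (by omega : (0 : Int) < q)]
  rw [show (a : Int) * q + c = (c : Int) + (q : Int) * a from by ring, Int.add_mul_emod_self_left]
  exact Int.emod_eq_of_lt (by omega) (by omega)

theorem pv_mod_right (r c q : Nat) (hc : c < q) :
    PySem.Int.mod (((r * q + c : Nat) : Int) + 1) (q : Int) = 0 ↔ c + 1 = q := by
  by_cases hcn : c + 1 = q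
  · rw [show ((r * q + c : Nat) : Int) + 1 = ((r : Int) + 1) * q + ((0 : Nat) : Int) from by
      push_cast
      have h1 : ((r : Int) + 1) * q = r * q + q := by ring
      omega]
    rw [show ((r : Int) + 1) = (((r + 1 : Nat)) : Int) from by push_cast; ring]
    rw [pv_mod_lin (r + 1) 0 q (by omega)]
    simp [hcn]
  · rw [show ((r * q + c : Nat) : Int) + 1 = ((r : Nat) : Int) * q + ((c + 1 : Nat) : Int) from by
      push_cast; ring]
    rw [pv_mod_lin r (c + 1) q (by omega)]
    constructor
    · intro h; omega
    · intro h; exact absurd h hcn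

theorem pv_main : ∀ (frame : List (List Int)), Pre_successors frame →
    successors frame = successors_alt frame := by
  intro frame hpre
  obtain ⟨hne, hrect, hmem⟩ := hpre
  obtain ⟨row0, rest, rfl⟩ : ∃ a b, frame = a :: b := by
    cases frame with
    | nil => exact absurd rfl hne
    | cons a b => exact ⟨_, _, rfl⟩
  have hrect2 : ∀ row ∈ row0 :: rest, row.length = row0.length := by simpa using hrect
  obtain ⟨r, c, hfind, hr, hc, hidx⟩ := pv_find_spec (row0 :: rest) row0.length hrect2 hmem
  have hA1 : ((r * row0.length + c : Nat) : Int) ≥ (row0.length : Int) ↔ 1 ≤ r := by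
    rw [ge_iff_le, Nat.cast_le]
    exact pv_bd_up r c _ hc
  have hA2 : ((r * row0.length + c : Nat) : Int) + (row0.length : Int)
      < ((row0 :: rest).flatten.length : Int) ↔ r < rest.length := by
    rw [pv_flatten_len _ row0.length hrect2,
      show ((r * row0.length + c : Nat) : Int) + (row0.length : Int)
        = ((r * row0.length + c + row0.length : Nat) : Int) from by push_cast; ring,
      Nat.cast_lt]
    rw [pv_bd_down r c _ _ hc]
    simp
  have hA3 : PySem.Int.mod ((r * row0.length + c : Nat) : Int) (row0.length : Int) ≠ 0 ↔ 1 ≤ c := by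
    rw [show ((r * row0.length + c : Nat) : Int) = (r : Int) * row0.length + (c : Nat) from by
      push_cast; ring]
    rw [pv_mod_lin r c _ hc]
    omega
  have hA4 : PySem.Int.mod (((r * row0.length + c : Nat) : Int) + 1) (row0.length : Int) ≠ 0
      ↔ c + 1 < row0.length := by
    rw [ne_eq, pv_mod_right r c _ hc]
    omega
  have hB1 : (0 ≤ (r : Int) + -1 ∧ (r : Int) + -1 < ((row0 :: rest).length : Int)
      ∧ 0 ≤ (c : Int) + 0 ∧ (c : Int) + 0 < (row0.length : Int)) ↔ 1 ≤ r := by omega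
  have hB2 : (0 ≤ (r : Int) + 1 ∧ (r : Int) + 1 < ((row0 :: rest).length : Int)
      ∧ 0 ≤ (c : Int) + 0 ∧ (c : Int) + 0 < (row0.length : Int)) ↔ r < rest.length := by
    simp only [List.length_cons]
    omega
  have hB3 : (0 ≤ (r : Int) + 0 ∧ (r : Int) + 0 < ((row0 :: rest).length : Int)
      ∧ 0 ≤ (c : Int) + -1 ∧ (c : Int) + -1 < (row0.length : Int)) ↔ 1 ≤ c := by omega
  have hB4 : (0 ≤ (r : Int) + 0 ∧ (r : Int) + 0 < ((row0 :: rest).length : Int)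
      ∧ 0 ≤ (c : Int) + 1 ∧ (c : Int) + 1 < (row0.length : Int)) ↔ c + 1 < row0.length := by omega
  have eup : 1 ≤ r →
      pvSwapA (row0 :: rest).flatten ((row0 :: rest).length : Int) (row0.length : Int)
        ((r * row0.length + c : Nat) : Int) (((r * row0.length + c : Nat) : Int) - (row0.length : Int))
      = pvSwapB (row0 :: rest) r c ((r : Int) + -1).toNat ((c : Int) + 0).toNat := by
    intro h1
    rw [show ((r : Int) + -1).toNat = r - 1 from by omega,
      show ((c : Int) + 0).toNat = c from by omega,
      show ((r * row0.length + c : Nat) : Int) - (row0.length : Int)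
        = (((r - 1) * row0.length + c : Nat) : Int) from by push_cast [Nat.cast_sub h1]; ring]
    exact pv_swap_eq _ _ hrect2 r c (r - 1) c hr hc (by omega) hc
  have edown : r < rest.length →
      pvSwapA (row0 :: rest).flatten ((row0 :: rest).length : Int) (row0.length : Int)
        ((r * row0.length + c : Nat) : Int) (((r * row0.length + c : Nat) : Int) + (row0.length : Int))
      = pvSwapB (row0 :: rest) r c ((r : Int) + 1).toNat ((c : Int) + 0).toNat := by
    intro h2
    rw [show ((r : Int) + 1).toNat = r + 1 from by omega,
      show ((c : Int) + 0).toNat = c from by omega,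
      show ((r * row0.length + c : Nat) : Int) + (row0.length : Int)
        = (((r + 1) * row0.length + c : Nat) : Int) from by push_cast; ring]
    exact pv_swap_eq _ _ hrect2 r c (r + 1) c hr hc (by simp only [List.length_cons]; omega) hc
  have eleft : 1 ≤ c →
      pvSwapA (row0 :: rest).flatten ((row0 :: rest).length : Int) (row0.length : Int)
        ((r * row0.length + c : Nat) : Int) (((r * row0.length + c : Nat) : Int) - 1)
      = pvSwapB (row0 :: rest) r c ((r : Int) + 0).toNat ((c : Int) + -1).toNat := by
    intro h3
    rw [show ((r : Int) + 0).toNat = r from by omega,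
      show ((c : Int) + -1).toNat = c - 1 from by omega,
      show ((r * row0.length + c : Nat) : Int) - 1
        = ((r * row0.length + (c - 1) : Nat) : Int) from by push_cast [Nat.cast_sub h3]; ring]
    exact pv_swap_eq _ _ hrect2 r c r (c - 1) hr hc hr (by omega)
  have eright : c + 1 < row0.length →
      pvSwapA (row0 :: rest).flatten ((row0 :: rest).length : Int) (row0.length : Int)
        ((r * row0.length + c : Nat) : Int) (((r * row0.length + c : Nat) : Int) + 1)
      = pvSwapB (row0 :: rest) r c ((r : Int) + 0).toNat ((c : Int) + 1).toNat := by
    intro h4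
    rw [show ((r : Int) + 0).toNat = r from by omega,
      show ((c : Int) + 1).toNat = c + 1 from by omega,
      show ((r * row0.length + c : Nat) : Int) + 1
        = ((r * row0.length + (c + 1) : Nat) : Int) from by push_cast; ring]
    exact pv_swap_eq _ _ hrect2 r c r (c + 1) hr hc hr h4
  have Eup : (if 1 ≤ r then
        some (pvSwapA (row0 :: rest).flatten ((row0 :: rest).length : Int) (row0.length : Int)
          ((r * row0.length + c : Nat) : Int)
          (((r * row0.length + c : Nat) : Int) - (row0.length : Int))) else none)
      = (if 1 ≤ r then
        some (pvSwapB (row0 :: rest) r c ((r : Int) + -1).toNat ((c : Int) + 0).toNat) else none) := by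
    split_ifs with h
    · exact congrArg some (eup h)
    · rfl
  have Edown : (if r < rest.length then
        some (pvSwapA (row0 :: rest).flatten ((row0 :: rest).length : Int) (row0.length : Int)
          ((r * row0.length + c : Nat) : Int)
          (((r * row0.length + c : Nat) : Int) + (row0.length : Int))) else none)
      = (if r < rest.length then
        some (pvSwapB (row0 :: rest) r c ((r : Int) + 1).toNat ((c : Int) + 0).toNat) else none) := by
    split_ifs with h
    · exact congrArg some (edown h)
    · rfl
  have Eleft : (if 1 ≤ c then
        some (pvSwapA (row0 :: rest).flatten ((row0 :: rest).length : Int) (row0.length : Int)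
          ((r * row0.length + c : Nat) : Int)
          (((r * row0.length + c : Nat) : Int) - 1)) else none)
      = (if 1 ≤ c then
        some (pvSwapB (row0 :: rest) r c ((r : Int) + 0).toNat ((c : Int) + -1).toNat) else none) := by
    split_ifs with h
    · exact congrArg some (eleft h)
    · rfl
  have Eright : (if c + 1 < row0.length then
        some (pvSwapA (row0 :: rest).flatten ((row0 :: rest).length : Int) (row0.length : Int)
          ((r * row0.length + c : Nat) : Int)
          (((r * row0.length + c : Nat) : Int) + 1)) else none)
      = (if c + 1 < row0.length then
        some (pvSwapB (row0 :: rest) r c ((r : Int) + 0).toNat ((c : Int) + 1).toNat) else none) := by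
    split_ifs with h
    · exact congrArg some (eright h)
    · rfl
  simp only [successors, successors_alt, hidx, hfind, List.foldl, List.headD_cons]
  simp only [hA1, hA2, hA3, hA4, hB1, hB2, hB3, hB4]
  rw [Eup, Edown, Eleft, Eright]
  by_cases h1 : 1 ≤ r <;> by_cases h2 : r < rest.length <;>
    by_cases h3 : 1 ≤ c <;> by_cases h4 : c + 1 < row0.length <;>
    simp [h1, h2, h3, h4]

-- ===== VERDICT (by name: the statement is the Claim_ definition above) =====
theorem successors_spec : Claim_equal_successors := by
  intro frame _ hpre
  exact pv_main frame hpre
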